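-- pv_equiv track=rewrite | github.com/probe301/darter | lib/autocad.py | _polyline_to_segments
-- ===== SOURCE A (Python) =====
-- def _polyline_to_segments(coords, i_segments):
--   """以i_segments作为关键节点打断polyline, 每段可能是直线(2个点) 可能是将返算圆弧的折线"""
--   # puts(i_segments)
--   side_vertexes = []
--   for i, vt in enumerate(coords):
--     side_vertexes.append(vt)
--     if i in i_segments:
--       if len(side_vertexes) > 1:
--         yield side_vertexes
--       side_vertexes = [vt]
--   else:  # 循环结束
--     side_vertexes.append(coords[0])
--     yield side_vertexes
-- ===== SOURCE B (Python) =====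
-- def _polyline_to_segments(coords, i_segments):
--   """以i_segments作为关键节点打断polyline: index-table-then-slice pass."""
--   boundaries = [i for i in range(len(coords)) if i in i_segments]
--   prev = 0
--   for b in boundaries:
--     if b > prev:
--       yield coords[prev:b + 1]
--     prev = b
--   yield coords[prev:] + [coords[0]]
-- ===== Notes on version B (the rewrite author's own statement) =====
-- stated objective: alternative
-- what changed: Replaces the per-vertex accumulate-and-reset scan with an index-table-then-slice pass: first collect the boundary indices, then emit each segment as a slice coords[prev:b+1] between consecutive boundaries, with the closing wrap segment coords[prev:]+[coords[0]] emitted unconditionally at the end.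
import Mathlib
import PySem

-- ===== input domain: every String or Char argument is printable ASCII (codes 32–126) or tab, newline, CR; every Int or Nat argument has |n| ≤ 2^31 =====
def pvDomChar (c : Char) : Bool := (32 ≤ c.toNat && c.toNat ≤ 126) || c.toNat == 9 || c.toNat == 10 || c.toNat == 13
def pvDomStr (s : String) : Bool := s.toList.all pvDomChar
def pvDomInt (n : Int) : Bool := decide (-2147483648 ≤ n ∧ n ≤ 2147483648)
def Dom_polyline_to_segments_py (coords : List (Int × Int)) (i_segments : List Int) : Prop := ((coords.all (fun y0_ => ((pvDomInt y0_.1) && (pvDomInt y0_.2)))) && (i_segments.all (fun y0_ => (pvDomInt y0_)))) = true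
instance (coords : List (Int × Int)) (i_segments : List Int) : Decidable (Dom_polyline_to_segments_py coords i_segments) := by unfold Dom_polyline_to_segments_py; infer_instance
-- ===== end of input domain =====

-- B replaces A's per-vertex accumulate-and-reset scan by a boundary-index-table-then-slice pass
-- (same cost; structurally different decomposition). Both raise IndexError on empty coords
-- (coords[0]); Pre_ excludes that.

-- ===== PORT A =====
-- the 'for i, vt in enumerate(coords)' loop: state = (yielded segments, side_vertexes)
def pvALoop (isegs : List Int) : List (Int × Int) → Int → List (List (Int × Int)) × List (Int × Int) → List (List (Int × Int)) × List (Int × Int)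
  | [], _, st => st
  | vt :: rest, i, (segs, side) =>
      let side' := side ++ [vt]
      if i ∈ isegs then
        pvALoop isegs rest (i + 1) ((if side'.length > 1 then segs ++ [side'] else segs), [vt])
      else
        pvALoop isegs rest (i + 1) (segs, side')

def polyline_to_segments_py (coords : List (Int × Int)) (i_segments : List Int) : List (List (Int × Int)) :=
  let st := pvALoop i_segments coords 0 ([], [])
  -- coords[0]: raises IndexError on empty coords (excluded by Pre_); headD default unreachable inside Pre_
  st.1 ++ [st.2 ++ [coords.headD (0, 0)]]

-- ===== PORT B =====
-- 'for b in boundaries' with prev: emit coords[prev:b+1] when b > prev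
def pvBLoop (coords : List (Int × Int)) : List Int → Int → List (List (Int × Int)) → List (List (Int × Int)) × Int
  | [], prev, segs => (segs, prev)
  | b :: bs, prev, segs =>
      pvBLoop coords bs b (if b > prev then segs ++ [PySem.List.slice coords (some prev) (some (b + 1))] else segs)

def polyline_to_segments_py_alt (coords : List (Int × Int)) (i_segments : List Int) : List (List (Int × Int)) :=
  let boundaries := ((List.range coords.length).map Int.ofNat).filter (fun i => decide (i ∈ i_segments))
  let st := pvBLoop coords boundaries 0 []
  -- coords[prev:] + [coords[0]]; coords[0] raises IndexError on empty coords (excluded by Pre_)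
  st.1 ++ [PySem.List.slice coords (some st.2) none ++ [coords.headD (0, 0)]]

-- ===== PRECONDITION & SPEC =====
-- Pre_ excludes exactly empty coords, where the Python A raises IndexError on coords[0].
def Pre_polyline_to_segments_py (coords : List (Int × Int)) (i_segments : List Int) : Prop := coords ≠ []
instance (coords : List (Int × Int)) (i_segments : List Int) : Decidable (Pre_polyline_to_segments_py coords i_segments) := by unfold Pre_polyline_to_segments_py; infer_instance
def pvWitness_polyline_to_segments_py : (List (Int × Int)) × List Int := ([(0, 0), (2, 3), (5, 5)], [1])

def Spec_polyline_to_segments_py (coords : List (Int × Int)) (i_segments : List Int) (out : List (List (Int × Int))) : Prop := out = polyline_to_segments_py_alt coords i_segments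
instance (coords : List (Int × Int)) (i_segments : List Int) (out : List (List (Int × Int))) : Decidable (Spec_polyline_to_segments_py coords i_segments out) := by unfold Spec_polyline_to_segments_py; infer_instance

-- ===== CLAIM (what is proved, stated in full; the proofs are below) =====
def Claim_equal_polyline_to_segments_py : Prop := ∀ (coords : List (Int × Int)) (i_segments : List Int), Dom_polyline_to_segments_py coords i_segments → Pre_polyline_to_segments_py coords i_segments → Spec_polyline_to_segments_py coords i_segments (polyline_to_segments_py coords i_segments)

-- ===== LEMMAS AND PROOFS =====

-- the boundary list of the suffix of indices [k, n)
def pvBnds (coords : List (Int × Int)) (isegs : List Int) (k : Nat) : List Int :=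
  ((List.range' k (coords.length - k)).map Int.ofNat).filter (fun i => decide (i ∈ isegs))

lemma pvBnds_step (coords : List (Int × Int)) (isegs : List Int) (k : Nat) (hk : k < coords.length) :
    pvBnds coords isegs k =
      if ((k : Int) ∈ isegs) then (k : Int) :: pvBnds coords isegs (k + 1) else pvBnds coords isegs (k + 1) := by
  have h : coords.length - k = (coords.length - (k + 1)) + 1 := by omega
  unfold pvBnds
  rw [h, List.range'_succ, List.map_cons, List.filter_cons]
  split_ifs with h1 h2 h3 <;> simp_all

lemma pvTake_snoc (coords : List (Int × Int)) (p k : Nat) (hpk : p ≤ k) (hk : k < coords.length) :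
    (coords.drop p).take (k - p) ++ [coords[k]] = (coords.drop p).take (k + 1 - p) := by
  have h1 : k - p < (coords.drop p).length := by simp [List.length_drop]; omega
  have h2 : (coords.drop p)[k - p]'h1 = coords[k] := by
    rw [List.getElem_drop]
    congr 1
    omega
  have h3 : k + 1 - p = (k - p) + 1 := by omega
  rw [← h2, h3, ← List.concat_eq_append, List.take_concat_get]

-- main invariant: processing indices [k, n) with side = coords[p:k] equals the
-- boundary-table pass over pvBnds k starting from prev = p
lemma pvKey (coords : List (Int × Int)) (isegs : List Int) :
    ∀ (rest : List (Int × Int)) (k p : Nat) (segs : List (List (Int × Int))),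
      rest = coords.drop k → p ≤ k → k ≤ coords.length →
      pvALoop isegs rest (k : Int) (segs, (coords.drop p).take (k - p)) =
        ((pvBLoop coords (pvBnds coords isegs k) (p : Int) segs).1,
         PySem.List.slice coords (some ((pvBLoop coords (pvBnds coords isegs k) (p : Int) segs).2)) none) := by
  intro rest
  induction rest with
  | nil =>
    intro k p segs hrest hpk hkn
    have hk : coords.length ≤ k := by
      by_contra h
      have := List.drop_eq_nil_iff.mp hrest.symm
      omega
    have hb : pvBnds coords isegs k = [] := by
      unfold pvBnds
      have : coords.length - k = 0 := by omega
      simp [this]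
    rw [hb]
    simp only [pvALoop, pvBLoop]
    rw [PySem.List.slice_from_natCast]
    have : (coords.drop p).take (k - p) = coords.drop p := by
      apply List.take_of_length_le
      simp [List.length_drop]
      omega
    rw [this]
  | cons vt rest' ih =>
    intro k p segs hrest hpk hkn
    have hk : k < coords.length := by
      by_contra h
      have hnil : coords.drop k = [] := List.drop_eq_nil_iff.mpr (by omega)
      rw [hnil] at hrest
      exact List.cons_ne_nil _ _ hrest
    have hvt : vt = coords[k] := by
      have h := congrArg List.head? hrest
      rw [List.head?_drop, List.getElem?_eq_getElem hk] at h
      simpa using h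
    have hrest' : rest' = coords.drop (k + 1) := by
      have h := congrArg List.tail hrest
      rw [List.tail_drop] at h
      simpa using h
    have hside' : (coords.drop p).take (k - p) ++ [vt] = (coords.drop p).take (k + 1 - p) := by
      rw [hvt]; exact pvTake_snoc coords p k hpk hk
    have hcast : ((k : Int)) + 1 = ((k + 1 : Nat) : Int) := by push_cast; ring
    rw [pvBnds_step coords isegs k hk]
    by_cases hmem : ((k : Int)) ∈ isegs
    · have hlen : ((coords.drop p).take (k + 1 - p)).length = k + 1 - p := by
        simp [List.length_take, List.length_drop]
        omega
      have hnewside : [vt] = (coords.drop k).take (k + 1 - k) := by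
        have : k + 1 - k = 1 := by omega
        rw [this, ← hrest]
        simp
      have hslice : PySem.List.slice coords (some ((p : Int))) (some ((k : Int) + 1)) = (coords.drop p).take (k + 1 - p) := by
        rw [hcast, PySem.List.slice_natCast]
      simp only [pvALoop, hmem, if_pos, hside', hcast, hlen]
      rw [hnewside, ih (k + 1) k _ hrest' (by omega) (by omega)]
      simp only [pvBLoop, gt_iff_lt]
      by_cases hplt : p < k
      · rw [if_pos (show 1 < k + 1 - p by omega), if_pos (show ((p:Int)) < ((k:Int)) by exact_mod_cast hplt), hslice]
      · rw [if_neg (show ¬ 1 < k + 1 - p by omega), if_neg (show ¬ ((p:Int)) < ((k:Int)) by exact_mod_cast hplt)]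
    · simp only [pvALoop, hmem, if_neg, not_false_iff, hside', hcast]
      exact ih (k + 1) p _ hrest' (by omega) (by omega)

-- ===== VERDICT (by name: the statement is the Claim_ definition above) =====
theorem polyline_to_segments_py_spec : Claim_equal_polyline_to_segments_py := by
  intro coords i_segments _ _
  unfold Spec_polyline_to_segments_py
  have h := pvKey coords i_segments coords 0 0 [] (by simp) (by omega) (by omega)
  norm_num at h
  have hb : pvBnds coords i_segments 0 = ((List.range coords.length).map Int.ofNat).filter (fun i => decide (i ∈ i_segments)) := by
    unfold pvBnds
    rw [Nat.sub_zero, ← List.range_eq_range']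
  rw [hb] at h
  show (pvALoop i_segments coords 0 ([], [])).1 ++ [(pvALoop i_segments coords 0 ([], [])).2 ++ [coords.headD (0, 0)]] =
    (pvBLoop coords (((List.range coords.length).map Int.ofNat).filter (fun i => decide (i ∈ i_segments))) 0 []).1 ++
      [PySem.List.slice coords (some ((pvBLoop coords (((List.range coords.length).map Int.ofNat).filter (fun i => decide (i ∈ i_segments))) 0 []).2)) none ++ [coords.headD (0, 0)]]
  rw [h]
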